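-- pv_equiv track=rewrite | github.com/amirza82/bubble_sheet_grading | main.py | extract_st_answer
-- ===== SOURCE A (Python) =====
-- def extract_st_answer(student_answer) -> int:
--     answer:int
--     for i in range(4):
--         if student_answer[i] == 1:
--             answer = i
--             for j in range(3-i):
--                 if student_answer[j + i + 1] == 1:
--                     return -1
--             return answer
--     return -1
-- ===== SOURCE B (Python) =====
-- def extract_st_answer(student_answer) -> int:
--     count = 0
--     idx = -1
--     for i in range(4):
--         if student_answer[i] == 1:
--             count += 1
--             if count == 2:
--                 return -1
--             idx = i
--     return idx if count == 1 else -1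
-- ===== Notes on version B (the rewrite author's own statement) =====
-- stated objective: simpler
-- what changed: Replaced the nested find-first-then-validate loops with one flat pass over range(4) maintaining a count of marks and the last marked index, returning -1 as soon as a second mark is seen.
import Mathlib
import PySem

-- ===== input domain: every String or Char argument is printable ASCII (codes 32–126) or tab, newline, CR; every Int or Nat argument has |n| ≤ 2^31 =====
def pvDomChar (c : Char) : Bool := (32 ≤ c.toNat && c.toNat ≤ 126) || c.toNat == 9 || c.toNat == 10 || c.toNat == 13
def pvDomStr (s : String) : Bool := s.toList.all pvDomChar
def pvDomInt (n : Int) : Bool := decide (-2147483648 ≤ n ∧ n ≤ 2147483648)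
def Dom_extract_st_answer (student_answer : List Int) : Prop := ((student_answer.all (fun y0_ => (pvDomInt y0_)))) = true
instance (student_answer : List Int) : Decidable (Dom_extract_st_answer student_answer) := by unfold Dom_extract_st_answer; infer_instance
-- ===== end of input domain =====

-- B rewrites A's nested find-first-then-validate loops as one flat counting pass; equivalence proved on Pre_, where Python A returns.

-- ===== PORT A =====
-- inner 'for j in range(3-i)': fuel = remaining iterations, j = current j
def aInnerLoop (sa : List Int) (i : Nat) : Nat → Nat → Int
  | 0, _ => Int.ofNat i
  | fuel+1, j =>
      if PySem.List.pyGetD sa (Int.ofNat (j + i + 1)) 0 == 1 then -1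
      else aInnerLoop sa i fuel (j+1)

-- outer 'for i in range(4)': fuel = remaining iterations, i = current i
def aOuterLoop (sa : List Int) : Nat → Nat → Int
  | 0, _ => -1
  | fuel+1, i =>
      if PySem.List.pyGetD sa (Int.ofNat i) 0 == 1 then aInnerLoop sa i (3-i) 0
      else aOuterLoop sa fuel (i+1)

def extract_st_answer (student_answer : List Int) : Int :=
  aOuterLoop student_answer 4 0

-- ===== PORT B =====
-- single pass: count of marks seen, idx = last marked index
def bLoop (sa : List Int) : Nat → Nat → Nat → Int → Int
  | 0, _, count, idx => if count == 1 then idx else -1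
  | fuel+1, i, count, idx =>
      if PySem.List.pyGetD sa (Int.ofNat i) 0 == 1 then
        if count + 1 == 2 then -1
        else bLoop sa fuel (i+1) (count+1) (Int.ofNat i)
      else bLoop sa fuel (i+1) count idx

def extract_st_answer_alt (student_answer : List Int) : Int :=
  bLoop student_answer 4 0 0 (-1)

-- ===== PRECONDITION & SPEC =====
-- Exactly the inputs on which Python A returns normally: it reaches index 3 (needs length ≥ 4)
-- unless a second mark makes it return -1 early (two entries equal to 1 inside the list).
def Pre_extract_st_answer (student_answer : List Int) : Prop :=
  4 ≤ student_answer.length ∨ 2 ≤ student_answer.count 1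
instance (student_answer : List Int) : Decidable (Pre_extract_st_answer student_answer) := by
  unfold Pre_extract_st_answer; infer_instance

def pvWitness_extract_st_answer : List Int := [0, 1, 0, 0]

def Spec_extract_st_answer (student_answer : List Int) (out : Int) : Prop := out = extract_st_answer_alt student_answer
instance (student_answer : List Int) (out : Int) : Decidable (Spec_extract_st_answer student_answer out) := by unfold Spec_extract_st_answer; infer_instance

-- ===== CLAIM (what is proved, stated in full; the proofs are below) =====
def Claim_equal_extract_st_answer : Prop := ∀ (student_answer : List Int), Dom_extract_st_answer student_answer → Pre_extract_st_answer student_answer → Spec_extract_st_answer student_answer (extract_st_answer student_answer)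

-- ===== LEMMAS AND PROOFS =====
-- The two ports agree on every list (both depend only on sa[0..3] via pyGetD with default 0).
theorem ports_agree (sa : List Int) : extract_st_answer sa = extract_st_answer_alt sa := by
  by_cases h0 : PySem.List.pyGetD sa (Int.ofNat 0) 0 == 1 <;>
  by_cases h1 : PySem.List.pyGetD sa (Int.ofNat 1) 0 == 1 <;>
  by_cases h2 : PySem.List.pyGetD sa (Int.ofNat 2) 0 == 1 <;>
  by_cases h3 : PySem.List.pyGetD sa (Int.ofNat 3) 0 == 1 <;>
  simp [extract_st_answer, extract_st_answer_alt, aOuterLoop, aInnerLoop, bLoop, h0, h1, h2, h3]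

-- ===== VERDICT (by name: the statement is the Claim_ definition above) =====
theorem extract_st_answer_spec : Claim_equal_extract_st_answer := by
  intro sa _ _
  exact ports_agree sa
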